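-- pv_equiv track=rewrite | github.com/smearle/script-doctor | plot_rl_eval_results.py | _build_expanded_heatmap_columns
-- ===== SOURCE A (Python) =====
-- def _build_expanded_heatmap_columns(
--     ordered_games: list[str], expected_levels_by_game: dict[str, list[int]]
-- ) -> tuple[list[tuple[str, int]], list[tuple[str, int, int]]]:
--     columns = []
--     game_spans = []
--     for game in ordered_games:
--         levels = expected_levels_by_game.get(game, [])
--         if not levels:
--             continue
--         start = len(columns)
--         for level in levels:
--             columns.append((game, level))
--         end = len(columns)
--         game_spans.append((game, start, end))
--     return columns, game_spans
-- ===== SOURCE B (Python) =====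
-- def _build_expanded_heatmap_columns(ordered_games, expected_levels_by_game):
--     columns = [
--         (game, level)
--         for game in ordered_games
--         for level in expected_levels_by_game.get(game, [])
--     ]
--     game_spans = []
--     offset = 0
--     for game in ordered_games:
--         n = len(expected_levels_by_game.get(game, []))
--         if n == 0:
--             continue
--         game_spans.append((game, offset, offset + n))
--         offset += n
--     return columns, game_spans
-- ===== Notes on version B (the rewrite author's own statement) =====
-- stated objective: alternative
-- what changed: Columns are built by a single nested comprehension and spans are derived in a separate pass from a running offset over per-game level counts, instead of one interleaved loop snapshotting len(columns).
import Mathlib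
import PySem

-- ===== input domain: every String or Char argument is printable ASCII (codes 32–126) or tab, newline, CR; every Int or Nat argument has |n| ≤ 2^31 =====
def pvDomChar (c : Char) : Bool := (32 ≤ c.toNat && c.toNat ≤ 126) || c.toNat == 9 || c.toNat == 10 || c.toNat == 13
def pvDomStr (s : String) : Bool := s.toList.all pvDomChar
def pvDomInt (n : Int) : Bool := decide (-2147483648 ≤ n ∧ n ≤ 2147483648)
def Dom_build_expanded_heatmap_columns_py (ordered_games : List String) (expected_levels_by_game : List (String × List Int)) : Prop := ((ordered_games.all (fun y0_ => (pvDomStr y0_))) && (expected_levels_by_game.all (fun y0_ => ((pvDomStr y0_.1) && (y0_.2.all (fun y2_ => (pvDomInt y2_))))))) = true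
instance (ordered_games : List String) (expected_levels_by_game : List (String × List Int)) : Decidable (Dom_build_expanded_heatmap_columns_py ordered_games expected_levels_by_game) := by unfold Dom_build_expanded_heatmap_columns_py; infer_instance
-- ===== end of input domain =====

-- B builds the columns with one nested comprehension and derives the spans in a separate
-- running-offset pass over per-game level counts (alternative decomposition, same cost).

-- ===== PORT A =====
-- A: one loop over ordered_games maintaining (columns, game_spans), snapshotting len(columns).
def build_expanded_heatmap_columns_py (ordered_games : List String) (expected_levels_by_game : List (String × List Int)) : (List (String × Int)) × (List (String × Int × Int)) :=
  ordered_games.foldl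
    (fun (st : List (String × Int) × List (String × Int × Int)) game =>
      let levels := (PySem.Dict.mk expected_levels_by_game).getD game []
      if levels = [] then st
      else
        let start : Int := st.1.length
        let columns := levels.foldl (fun cols level => cols ++ [(game, level)]) st.1
        let «end» : Int := columns.length
        (columns, st.2 ++ [(game, start, «end»)]))
    ([], [])

-- ===== PORT B =====
-- B: columns as a flat nested comprehension.
def build_expanded_heatmap_columns_py_alt (ordered_games : List String) (expected_levels_by_game : List (String × List Int)) : (List (String × Int)) × (List (String × Int × Int)) :=
  let columns := ordered_games.flatMap
    (fun game => ((PySem.Dict.mk expected_levels_by_game).getD game []).map (fun level => (game, level)))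
  -- second pass: running offset over per-game level counts
  let spans := (ordered_games.foldl
    (fun (st : Int × List (String × Int × Int)) game =>
      let n : Int := ((PySem.Dict.mk expected_levels_by_game).getD game []).length
      if n = 0 then st
      else (st.1 + n, st.2 ++ [(game, st.1, st.1 + n)]))
    (0, [])).2
  (columns, spans)

-- ===== PRECONDITION & SPEC =====
def Spec_build_expanded_heatmap_columns_py (ordered_games : List String) (expected_levels_by_game : List (String × List Int)) (out : (List (String × Int)) × (List (String × Int × Int))) : Prop := out = build_expanded_heatmap_columns_py_alt ordered_games expected_levels_by_game
instance (ordered_games : List String) (expected_levels_by_game : List (String × List Int)) (out : (List (String × Int)) × (List (String × Int × Int))) : Decidable (Spec_build_expanded_heatmap_columns_py ordered_games expected_levels_by_game out) := by unfold Spec_build_expanded_heatmap_columns_py; infer_instance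

-- ===== CLAIM (what is proved, stated in full; the proofs are below) =====
def Claim_equal_build_expanded_heatmap_columns_py : Prop := ∀ (ordered_games : List String) (expected_levels_by_game : List (String × List Int)), Dom_build_expanded_heatmap_columns_py ordered_games expected_levels_by_game → Spec_build_expanded_heatmap_columns_py ordered_games expected_levels_by_game (build_expanded_heatmap_columns_py ordered_games expected_levels_by_game)

-- ===== LEMMAS AND PROOFS =====

-- the inner append loop of A is a map appended to the accumulator
theorem pv_inner_foldl (game : String) (levels : List Int) (cols : List (String × Int)) :
    levels.foldl (fun cols level => cols ++ [(game, level)]) cols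
      = cols ++ levels.map (fun level => (game, level)) := by
  induction levels generalizing cols with
  | nil => simp
  | cons l ls ih => simp [List.foldl, ih]

-- main invariant relating A's single fold to B's two passes, for any accumulated state
theorem pv_main (e : List (String × List Int)) (games : List String)
    (cols : List (String × Int)) (spans : List (String × Int × Int)) :
    games.foldl
      (fun (st : List (String × Int) × List (String × Int × Int)) game =>
        let levels := (PySem.Dict.mk e).getD game []
        if levels = [] then st
        else
          let start : Int := st.1.length
          let columns := levels.foldl (fun cols level => cols ++ [(game, level)]) st.1
          let «end» : Int := columns.length
          (columns, st.2 ++ [(game, start, «end»)]))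
      (cols, spans)
    = (cols ++ games.flatMap (fun game => ((PySem.Dict.mk e).getD game []).map (fun level => (game, level))),
       (games.foldl
         (fun (st : Int × List (String × Int × Int)) game =>
           let n : Int := ((PySem.Dict.mk e).getD game []).length
           if n = 0 then st
           else (st.1 + n, st.2 ++ [(game, st.1, st.1 + n)]))
         ((cols.length : Int), spans)).2) := by
  induction games generalizing cols spans with
  | nil => simp
  | cons g gs ih =>
    simp only [List.foldl, List.flatMap_cons]
    by_cases h : (PySem.Dict.mk e).getD g [] = []
    · simp only [h, List.length_nil, Int.natCast_zero, List.map_nil, List.nil_append]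
      simpa using ih cols spans
    · have hn : ¬ ((((PySem.Dict.mk e).getD g []).length : Int) = 0) := by
        simpa [List.length_eq_zero_iff] using h
      rw [if_neg h, if_neg hn, pv_inner_foldl]
      rw [ih]
      simp [List.append_assoc]

-- ===== VERDICT (by name: the statement is the Claim_ definition above) =====
theorem build_expanded_heatmap_columns_py_spec : Claim_equal_build_expanded_heatmap_columns_py := by
  intro og e _
  unfold Spec_build_expanded_heatmap_columns_py
  unfold build_expanded_heatmap_columns_py build_expanded_heatmap_columns_py_alt
  rw [pv_main]
  simp
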